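-- pv_equiv track=rewrite | github.com/SeungWoo-You/PS | 프로그래머스/lv3/81303. 표 편집/표 편집.py | solution
-- ===== SOURCE A (Python) =====
-- def solution(n, k, cmd):
--     answer = ['O'] * n
--     table = {i: [i - 1, i + 1] for i in range(n)}
--     now = k
--     table[0] = [None, 1]
--     table[n - 1] = [n - 2, None]
--     rmd: list[list[int]] = []
--     for T in cmd:
--         if T == 'C':
--             answer[now] = 'X'
--             prev, nxt = table[now]
--             rmd.append([prev, now, nxt])
--             if nxt == None:
--                 now = prev
--             else:
--                 now = nxt
--             if prev == None:
--                 table[nxt][0] = None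
--             elif nxt == None:
--                 table[prev][1] = None
--             else:
--                 table[prev][1] = nxt
--                 table[nxt][0] = prev
--         elif T == 'Z':
--             prev, rec, nxt = rmd.pop()
--             answer[rec] = 'O'
--             if prev == None:
--                 table[nxt][0] = rec
--             elif nxt == None:
--                 table[prev][1] = rec
--             else:
--                 table[nxt][0] = rec
--                 table[prev][1] = rec
--         else:
--             D, count = T.split()
--             count = int(count)
--             if D == 'D':
--                 for _ in range(count):
--                     now = table[now][1]
--             else:
--                 for _ in range(count):
--                     now = table[now][0]
--     return ''.join(answer)
-- ===== SOURCE B (Python) =====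
-- def _next(answer, n, j):
--     # smallest index i with j <= i < n and answer[i] == 'O', else None
--     while j < n and answer[j] == 'X':
--         j += 1
--     return j if j < n else None
--
--
-- def _prev(answer, j):
--     # largest index i with 0 <= i <= j and answer[i] == 'O', else None
--     while j >= 0 and answer[j] == 'X':
--         j -= 1
--     return j if j >= 0 else None
--
--
-- def solution(n, k, cmd):
--     answer = ['O'] * n
--     deleted = []
--     now = k
--     for T in cmd:
--         if T == 'C':
--             answer[now] = 'X'
--             deleted.append(now)
--             nxt = _next(answer, n, now + 1)
--             now = nxt if nxt is not None else _prev(answer, now - 1)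
--         elif T == 'Z':
--             answer[deleted.pop()] = 'O'
--         else:
--             d, c = T.split()
--             if d == 'D':
--                 for _ in range(int(c)):
--                     now = _next(answer, n, now + 1)
--             else:
--                 for _ in range(int(c)):
--                     now = _prev(answer, now - 1)
--     return ''.join(answer)
-- ===== Notes on version B (the rewrite author's own statement) =====
-- stated objective: simpler
-- what changed: B drops A's doubly-linked-list dict and undo frames entirely: it keeps only the O/X answer array, an undo stack of deleted indices, and a cursor, finding neighbours by scanning the array for the nearest alive row (and restoring by just flipping the popped index back to 'O').
-- outside the precondition, e.g. on solution(1, 0, ['U 1']): A returns 'O', B returns 'O'; on solution(0, 0, ['D 1']): A returns '', B returns ''; on solution(1, 0, ['U 1', 'D 0']): A returns 'O', B returns 'O'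
import Mathlib
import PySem

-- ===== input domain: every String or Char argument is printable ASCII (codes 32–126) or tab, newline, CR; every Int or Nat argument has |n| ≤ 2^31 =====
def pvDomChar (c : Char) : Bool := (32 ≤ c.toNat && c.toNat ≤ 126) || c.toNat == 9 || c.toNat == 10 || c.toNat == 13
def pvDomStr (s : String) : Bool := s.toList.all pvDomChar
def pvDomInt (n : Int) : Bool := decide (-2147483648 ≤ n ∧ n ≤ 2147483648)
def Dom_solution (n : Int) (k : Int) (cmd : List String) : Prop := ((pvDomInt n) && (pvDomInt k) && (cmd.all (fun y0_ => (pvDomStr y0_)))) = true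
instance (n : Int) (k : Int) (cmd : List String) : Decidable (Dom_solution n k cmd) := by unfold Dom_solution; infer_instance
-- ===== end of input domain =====

-- B replaces A's doubly-linked-list dict by plain scans over the answer array and an undo
-- stack of deleted indices: simpler, no pointer bookkeeping (objective: simpler; no speed claim).
-- Both ports are faithful on Pre_solution (inputs where A returns normally); A mutates nothing observable.

-- ===== PORT A =====
-- Python's `for _ in range(cnt): now = f(now)` where f raises on None: the raising iterations are
-- excluded by Pre_; on None we propagate none (unreachable under Pre_).
def moveLoop (f : Int → Option Int) : Nat → Option Int → Option Int
  | 0, now => now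
  | m + 1, now => moveLoop f m (match now with | some i => f i | none => none)

structure StA where
  ans : List Char
  tbl : Int → Option Int × Option Int   -- Python dict {i: [prev, next]} with keys range(n), modelled
                                        -- as a total function updated pointwise; lookups of missing
                                        -- keys (KeyError in Python) are excluded by Pre_solution
  now : Option Int
  rmd : List (Option Int × Int × Option Int)

def stepA (n : Int) (st : StA) (T : String) : StA :=
  if T = "C" then
    match st.now with
    | none => st        -- Python raises TypeError here; excluded by Pre_
    | some i =>
      let ans := PySem.List.pySetD st.ans i 'X'
      let p := (st.tbl i).1
      let nx := (st.tbl i).2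
      let rmd := st.rmd ++ [(p, i, nx)]
      let now' := match nx with | none => p | some _ => nx
      let tbl' :=
        match p, nx with
        | none, none => st.tbl          -- Python: table[None] KeyError; excluded by Pre_
        | none, some x2 => Function.update st.tbl x2 (none, (st.tbl x2).2)
        | some p1, none => Function.update st.tbl p1 ((st.tbl p1).1, none)
        | some p1, some x2 =>
          let t1 := Function.update st.tbl p1 ((st.tbl p1).1, some x2)
          Function.update t1 x2 (some p1, (t1 x2).2)
      ⟨ans, tbl', now', rmd⟩
  else if T = "Z" then
    match st.rmd.getLast? with
    | none => st        -- Python: pop from empty list IndexError; excluded by Pre_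
    | some (p, rec, nx) =>
      let rmd := st.rmd.dropLast
      let ans := PySem.List.pySetD st.ans rec 'O'
      let tbl' :=
        match p, nx with
        | none, none => st.tbl          -- Python: table[None] KeyError; excluded by Pre_
        | none, some x2 => Function.update st.tbl x2 (some rec, (st.tbl x2).2)
        | some p1, none => Function.update st.tbl p1 ((st.tbl p1).1, some rec)
        | some p1, some x2 =>
          let t1 := Function.update st.tbl x2 (some rec, (st.tbl x2).2)
          Function.update t1 p1 ((t1 p1).1, some rec)
      ⟨ans, tbl', st.now, rmd⟩
  else
    match PySem.Str.split₀ T with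
    | [d, c] =>
      match PySem.Int.ofStr? c with
      | some cnt =>
        if d = "D" then
          ⟨st.ans, st.tbl, moveLoop (fun i => (st.tbl i).2) cnt.toNat st.now, st.rmd⟩
        else
          ⟨st.ans, st.tbl, moveLoop (fun i => (st.tbl i).1) cnt.toNat st.now, st.rmd⟩
      | none => st      -- Python: int(c) ValueError; excluded by Pre_
    | _ => st           -- Python: unpack ValueError; excluded by Pre_

def solution (n : Int) (k : Int) (cmd : List String) : String :=
  let ans := List.replicate n.toNat 'O'
  let t0 : Int → Option Int × Option Int := fun i => (some (i - 1), some (i + 1))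
  let t1 := Function.update t0 0 (none, some 1)
  let t2 := Function.update t1 (n - 1) (some (n - 2), none)
  String.ofList (cmd.foldl (stepA n) ⟨ans, t2, some k, []⟩).ans

-- ===== PORT B =====
-- port of _next: smallest j ≤ i < n with answer[i] ≠ 'X', else None
def scanNext (ans : List Char) (n : Int) (j : Int) : Option Int :=
  if h : j < n then
    if PySem.List.pyGetD ans j 'O' = 'X' then scanNext ans n (j + 1) else some j
  else none
termination_by (n - j).toNat
decreasing_by omega

-- port of _prev: largest 0 ≤ i ≤ j with answer[i] ≠ 'X', else None
def scanPrev (ans : List Char) (j : Int) : Option Int :=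
  if h : 0 ≤ j then
    if PySem.List.pyGetD ans j 'O' = 'X' then scanPrev ans (j - 1) else some j
  else none
termination_by (j + 1).toNat
decreasing_by omega

structure StB where
  ans : List Char
  del : List Int
  now : Option Int

def stepB (n : Int) (st : StB) (T : String) : StB :=
  if T = "C" then
    match st.now with
    | none => st        -- Python raises TypeError here; excluded by Pre_
    | some i =>
      let ans := PySem.List.pySetD st.ans i 'X'
      let del := st.del ++ [i]
      let now' := match scanNext ans n (i + 1) with
        | some j => some j
        | none => scanPrev ans (i - 1)
      ⟨ans, del, now'⟩
  else if T = "Z" then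
    match st.del.getLast? with
    | none => st        -- Python: pop from empty list IndexError; excluded by Pre_
    | some x => ⟨PySem.List.pySetD st.ans x 'O', st.del.dropLast, st.now⟩
  else
    match PySem.Str.split₀ T with
    | [d, c] =>
      match PySem.Int.ofStr? c with
      | some cnt =>
        if d = "D" then
          ⟨st.ans, st.del, moveLoop (fun i => scanNext st.ans n (i + 1)) cnt.toNat st.now⟩
        else
          ⟨st.ans, st.del, moveLoop (fun i => scanPrev st.ans (i - 1)) cnt.toNat st.now⟩
      | none => st
    | _ => st

def solution_alt (n : Int) (k : Int) (cmd : List String) : String :=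
  String.ofList (cmd.foldl (stepB n) ⟨List.replicate n.toNat 'O', [], some k⟩).ans

-- ===== PRECONDITION & SPEC =====
-- validity simulator for Pre_: tracks only the list of deleted rows and the cursor,
-- and fails exactly where Python A raises (missing-key/None dereference, empty pop, bad parse)
def simNextAux (del : List Int) : Nat → Int → Option Int
  | 0, _ => none
  | f + 1, j => if j ∈ del then simNextAux del f (j + 1) else some j

def simNext (del : List Int) (n : Int) (j : Int) : Option Int :=
  simNextAux del (n - j).toNat j

def simPrevAux (del : List Int) : Nat → Int → Option Int
  | 0, _ => none
  | f + 1, j => if j ∈ del then simPrevAux del f (j - 1) else some j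

def simPrev (del : List Int) (j : Int) : Option Int :=
  simPrevAux del (j + 1).toNat j

def simMove (f : Int → Option Int) (n : Int) : Nat → Option (Option Int) → Option (Option Int)
  | 0, s => s
  | m + 1, s =>
    match s with
    | some (some i) => if 0 ≤ i ∧ i < n then simMove f n m (some (f i)) else none
    | _ => none

def simStep (n : Int) (s : Option (List Int × Option Int)) (T : String) : Option (List Int × Option Int) :=
  match s with
  | none => none
  | some (del, now) =>
    if T = "C" then
      match now with
      | some i =>
        if 0 ≤ i ∧ i < n ∧ i ∉ del then
          match simNext del n (i + 1), simPrev del (i - 1) with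
          | none, none => none
          | some x, _ => some (del ++ [i], some x)
          | none, p => some (del ++ [i], p)
        else none
      | none => none
    else if T = "Z" then
      if del = [] then none else some (del.dropLast, now)
    else
      match PySem.Str.split₀ T with
      | [d, c] =>
        match PySem.Int.ofStr? c with
        | some cnt =>
          match simMove (fun i => if d = "D" then simNext del n (i + 1) else simPrev del (i - 1)) n cnt.toNat (some now) with
          | some now' => some (del, now')
          | none => none
        | none => none
      | _ => none

-- 'D c'/'U c' (any first word) with count ≤ 0: a no-op move A performs without touching the table
def smallMoveB (T : String) : Bool :=
  match PySem.Str.split₀ T with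
  | [_, c] => match PySem.Int.ofStr? c with
    | some m => m ≤ 0
    | none => false
  | _ => false

-- Pre_ admits: the empty script (A is total there); n ≥ 2 with a script that never dereferences a
-- missing neighbour / missing key, never pops an empty undo stack and always parses (elsewhere A
-- raises KeyError/IndexError/TypeError/ValueError); and n ≤ 1 with only no-op moves (count ≤ 0).
-- It excludes a residue of degenerate inputs with n ≤ 1 on which A returns only thanks to the
-- accidental dict keys 0 and -1 created by `table[0] = …; table[n-1] = …` when range(n) lacks them.
def Pre_solution (n : Int) (k : Int) (cmd : List String) : Prop :=
  cmd = [] ∨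
  (2 ≤ n ∧ (cmd.foldl (simStep n) (some ([], some k))).isSome = true) ∨
  (n ≤ 1 ∧ ∀ T ∈ cmd, smallMoveB T = true)

instance (n : Int) (k : Int) (cmd : List String) : Decidable (Pre_solution n k cmd) := by
  unfold Pre_solution; infer_instance

def pvWitness_solution : Int × Int × List String := (3, 0, ["C", "D 1", "C", "Z", "U 1"])

def Spec_solution (n : Int) (k : Int) (cmd : List String) (out : String) : Prop := out = solution_alt n k cmd
instance (n : Int) (k : Int) (cmd : List String) (out : String) : Decidable (Spec_solution n k cmd out) := by unfold Spec_solution; infer_instance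

-- ===== CLAIM (what is proved, stated in full; the proofs are below) =====
def Claim_equal_solution : Prop := ∀ (n : Int) (k : Int) (cmd : List String), Dom_solution n k cmd → Pre_solution n k cmd → Spec_solution n k cmd (solution n k cmd)

-- ===== LEMMAS AND PROOFS =====

-- cell access after a pointwise write
lemma g_set (ans : List Char) (x t : Int) (c : Char) (hx0 : 0 ≤ x) (hxl : x < (ans.length : Int)) (ht : 0 ≤ t) :
    PySem.List.pyGetD (PySem.List.pySetD ans x c) t 'O' = if t = x then c else PySem.List.pyGetD ans t 'O' := by
  rw [PySem.List.pySetD_of_nonneg _ _ hx0, PySem.List.pyGetD_of_nonneg _ _ ht,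
    PySem.List.pyGetD_of_nonneg _ _ ht]
  simp only [List.getD_eq_getElem?_getD, List.getElem?_set]
  by_cases h : t = x
  · subst h
    have hl : t.toNat < ans.length := by omega
    simp [hl]
  · rw [if_neg h]
    by_cases hx : x.toNat = t.toNat
    · omega
    · rw [if_neg hx]

-- writing back the value already there
lemma set_same (ans : List Char) (x : Int) (c : Char) (hx0 : 0 ≤ x)
    (h : PySem.List.pyGetD ans x 'O' = c) : PySem.List.pySetD ans x c = ans := by
  rw [PySem.List.pySetD_of_nonneg _ _ hx0]
  by_cases hxl : x.toNat < ans.length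
  · rw [PySem.List.pyGetD_eq_getElem ans 'O' hx0 (by omega)] at h
    rw [← h]; exact List.set_getElem_self ..
  · exact List.set_eq_of_length_le (by omega)

lemma kill_revive (ans : List Char) (x : Int) (hx0 : 0 ≤ x)
    (h : PySem.List.pyGetD ans x 'O' = 'O') :
    PySem.List.pySetD (PySem.List.pySetD ans x 'X') x 'O' = ans := by
  rw [PySem.List.pySetD_of_nonneg _ _ hx0, PySem.List.pySetD_of_nonneg _ _ hx0, List.set_set]
  rw [← PySem.List.pySetD_of_nonneg _ _ hx0]
  exact set_same ans x 'O' hx0 h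

-- scanNext: soundness and uniqueness
lemma scanNext_some (ans : List Char) (n j r : Int) (h : scanNext ans n j = some r) :
    j ≤ r ∧ r < n ∧ PySem.List.pyGetD ans r 'O' ≠ 'X' ∧
      ∀ t, j ≤ t → t < r → PySem.List.pyGetD ans t 'O' = 'X' := by
  fun_induction scanNext ans n j with
  | case1 j hlt hX ih =>
    obtain ⟨h1, h2, h3, h4⟩ := ih h
    refine ⟨by omega, h2, h3, fun t ht1 ht2 => ?_⟩
    rcases eq_or_lt_of_le ht1 with rfl | hlt2
    · exact hX
    · exact h4 t (by omega) ht2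
  | case2 j hlt hO => cases h; exact ⟨le_refl _, hlt, hO, fun t ht1 ht2 => absurd ht1 (by omega)⟩
  | case3 j hlt => cases h

lemma scanNext_none (ans : List Char) (n j : Int) (h : scanNext ans n j = none) :
    ∀ t, j ≤ t → t < n → PySem.List.pyGetD ans t 'O' = 'X' := by
  fun_induction scanNext ans n j with
  | case1 j hlt hX ih =>
    intro t ht1 ht2
    rcases eq_or_lt_of_le ht1 with rfl | hlt2
    · exact hX
    · exact ih h t (by omega) ht2
  | case2 j hlt hO => cases h
  | case3 j hlt => intro t ht1 ht2; omega

lemma scanNext_eq_some (ans : List Char) (n j r : Int) :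
    j ≤ r → r < n → PySem.List.pyGetD ans r 'O' ≠ 'X' →
    (∀ t, j ≤ t → t < r → PySem.List.pyGetD ans t 'O' = 'X') → scanNext ans n j = some r := by
  fun_induction scanNext ans n j with
  | case1 j hlt hX ih =>
    intro h1 h2 h3 h4
    have hjr : j < r := by
      rcases eq_or_lt_of_le h1 with rfl | h
      · exact absurd hX h3
      · exact h
    exact ih (by omega) h2 h3 (fun t ht1 ht2 => h4 t (by omega) ht2)
  | case2 j hlt hO =>
    intro h1 h2 h3 h4
    rcases eq_or_lt_of_le h1 with rfl | h
    · rfl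
    · exact absurd (h4 j le_rfl h) hO
  | case3 j hlt => intro h1 h2 h3 h4; omega

lemma scanNext_eq_none (ans : List Char) (n j : Int)
    (h : ∀ t, j ≤ t → t < n → PySem.List.pyGetD ans t 'O' = 'X') : scanNext ans n j = none := by
  fun_induction scanNext ans n j with
  | case1 j hlt hX ih => exact ih (fun t ht1 ht2 => h t (by omega) ht2)
  | case2 j hlt hO => exact absurd (h j le_rfl hlt) hO
  | case3 j hlt => rfl

-- scanPrev: soundness and uniqueness
lemma scanPrev_some (ans : List Char) (j r : Int) (h : scanPrev ans j = some r) :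
    0 ≤ r ∧ r ≤ j ∧ PySem.List.pyGetD ans r 'O' ≠ 'X' ∧
      ∀ t, r < t → t ≤ j → PySem.List.pyGetD ans t 'O' = 'X' := by
  fun_induction scanPrev ans j with
  | case1 j hge hX ih =>
    obtain ⟨h1, h2, h3, h4⟩ := ih h
    refine ⟨h1, by omega, h3, fun t ht1 ht2 => ?_⟩
    rcases eq_or_lt_of_le ht2 with rfl | hlt2
    · exact hX
    · exact h4 t ht1 (by omega)
  | case2 j hge hO => cases h; exact ⟨hge, le_refl _, hO, fun t ht1 ht2 => absurd ht1 (by omega)⟩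
  | case3 j hge => cases h

lemma scanPrev_none (ans : List Char) (j : Int) (h : scanPrev ans j = none) :
    ∀ t, 0 ≤ t → t ≤ j → PySem.List.pyGetD ans t 'O' = 'X' := by
  fun_induction scanPrev ans j with
  | case1 j hge hX ih =>
    intro t ht1 ht2
    rcases eq_or_lt_of_le ht2 with rfl | hlt2
    · exact hX
    · exact ih h t ht1 (by omega)
  | case2 j hge hO => cases h
  | case3 j hge => intro t ht1 ht2; omega

lemma scanPrev_eq_some (ans : List Char) (j r : Int) :
    0 ≤ r → r ≤ j → PySem.List.pyGetD ans r 'O' ≠ 'X' →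
    (∀ t, r < t → t ≤ j → PySem.List.pyGetD ans t 'O' = 'X') → scanPrev ans j = some r := by
  fun_induction scanPrev ans j with
  | case1 j hge hX ih =>
    intro h1 h2 h3 h4
    have hjr : r < j := by
      rcases eq_or_lt_of_le h2 with rfl | h
      · exact absurd hX h3
      · exact h
    exact ih h1 (by omega) h3 (fun t ht1 ht2 => h4 t ht1 (by omega))
  | case2 j hge hO =>
    intro h1 h2 h3 h4
    rcases eq_or_lt_of_le h2 with rfl | h
    · rfl
    · exact absurd (h4 j h le_rfl) hO
  | case3 j hge => intro h1 h2 h3 h4; omega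

lemma scanPrev_eq_none (ans : List Char) (j : Int)
    (h : ∀ t, 0 ≤ t → t ≤ j → PySem.List.pyGetD ans t 'O' = 'X') : scanPrev ans j = none := by
  fun_induction scanPrev ans j with
  | case1 j hge hX ih => exact ih (fun t ht1 ht2 => h t ht1 (by omega))
  | case2 j hge hO => exact absurd (h j hge le_rfl) hO
  | case3 j hge => rfl

-- the Pre_ simulator scans agree with the array scans when membership matches deadness
lemma simNextAux_eq (del : List Int) (ans : List Char) (n : Int) :
    ∀ (f : Nat) (j : Int), f = (n - j).toNat →
      (∀ t, j ≤ t → t < n → (t ∈ del ↔ PySem.List.pyGetD ans t 'O' = 'X')) →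
      simNextAux del f j = scanNext ans n j := by
  intro f
  induction f with
  | zero =>
    intro j hf h
    rw [simNextAux, scanNext, dif_neg (by omega)]
  | succ f ih =>
    intro j hf h
    have hlt : j < n := by omega
    rw [simNextAux]
    conv_rhs => rw [scanNext]
    rw [dif_pos hlt]
    by_cases hmem : j ∈ del
    · rw [if_pos hmem, if_pos ((h j le_rfl hlt).mp hmem)]
      exact ih (j + 1) (by omega) (fun t ht1 ht2 => h t (by omega) ht2)
    · rw [if_neg hmem, if_neg (fun hx => hmem ((h j le_rfl hlt).mpr hx))]

lemma simNext_eq_scanNext (del : List Int) (ans : List Char) (n j : Int)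
    (h : ∀ t, j ≤ t → t < n → (t ∈ del ↔ PySem.List.pyGetD ans t 'O' = 'X')) :
    simNext del n j = scanNext ans n j :=
  simNextAux_eq del ans n (n - j).toNat j rfl h

lemma simPrevAux_eq (del : List Int) (ans : List Char) :
    ∀ (f : Nat) (j : Int), f = (j + 1).toNat →
      (∀ t, 0 ≤ t → t ≤ j → (t ∈ del ↔ PySem.List.pyGetD ans t 'O' = 'X')) →
      simPrevAux del f j = scanPrev ans j := by
  intro f
  induction f with
  | zero =>
    intro j hf h
    rw [simPrevAux, scanPrev, dif_neg (by omega)]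
  | succ f ih =>
    intro j hf h
    have hge : 0 ≤ j := by omega
    rw [simPrevAux]
    conv_rhs => rw [scanPrev]
    rw [dif_pos hge]
    by_cases hmem : j ∈ del
    · rw [if_pos hmem, if_pos ((h j hge le_rfl).mp hmem)]
      exact ih (j - 1) (by omega) (fun t ht1 ht2 => h t ht1 (by omega))
    · rw [if_neg hmem, if_neg (fun hx => hmem ((h j hge le_rfl).mpr hx))]

lemma simPrev_eq_scanPrev (del : List Int) (ans : List Char) (j : Int)
    (h : ∀ t, 0 ≤ t → t ≤ j → (t ∈ del ↔ PySem.List.pyGetD ans t 'O' = 'X')) :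
    simPrev del j = scanPrev ans j :=
  simPrevAux_eq del ans (j + 1).toNat j rfl h

-- effect of deleting cell i on the scans
lemma scanNext_kill (ans : List Char) (n i j : Int) (hi0 : 0 ≤ i) (hil : i < (ans.length : Int)) (hj : 0 ≤ j) :
    scanNext (PySem.List.pySetD ans i 'X') n j =
      if scanNext ans n j = some i then scanNext ans n (i + 1) else scanNext ans n j := by
  have hg : ∀ t, 0 ≤ t → PySem.List.pyGetD (PySem.List.pySetD ans i 'X') t 'O'
      = if t = i then 'X' else PySem.List.pyGetD ans t 'O' := fun t ht => g_set ans i t 'X' hi0 hil ht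
  cases h : scanNext ans n j with
  | none =>
    rw [if_neg (by simp)]
    refine scanNext_eq_none _ n j (fun t ht1 ht2 => ?_)
    rw [hg t (by omega)]
    split_ifs with he
    · rfl
    · exact scanNext_none ans n j h t ht1 ht2
  | some r =>
    obtain ⟨h1, h2, h3, h4⟩ := scanNext_some ans n j r h
    by_cases hri : r = i
    · subst hri
      rw [if_pos rfl]
      cases h2' : scanNext ans n (r + 1) with
      | some r2 =>
        obtain ⟨g1, g2, g3, g4⟩ := scanNext_some ans n (r + 1) r2 h2'
        refine scanNext_eq_some _ n j r2 (by omega) g2 ?_ (fun t ht1 ht2 => ?_)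
        · rw [hg r2 (by omega), if_neg (by omega)]; exact g3
        · rw [hg t (by omega)]
          split_ifs with he
          · rfl
          · rcases lt_or_gt_of_ne he with hlt | hgt
            · exact h4 t ht1 hlt
            · exact g4 t (by omega) ht2
      | none =>
        refine scanNext_eq_none _ n j (fun t ht1 ht2 => ?_)
        rw [hg t (by omega)]
        split_ifs with he
        · rfl
        · rcases lt_or_gt_of_ne he with hlt | hgt
          · exact h4 t ht1 hlt
          · exact scanNext_none ans n (r + 1) h2' t (by omega) ht2
    · rw [if_neg (by simp [hri])]
      refine scanNext_eq_some _ n j r h1 h2 ?_ (fun t ht1 ht2 => ?_)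
      · rw [hg r (by omega), if_neg hri]; exact h3
      · rw [hg t (by omega)]
        split_ifs with he
        · rfl
        · exact h4 t ht1 ht2

lemma scanPrev_kill (ans : List Char) (i j : Int) (hi0 : 0 ≤ i) (hil : i < (ans.length : Int)) :
    scanPrev (PySem.List.pySetD ans i 'X') j =
      if scanPrev ans j = some i then scanPrev ans (i - 1) else scanPrev ans j := by
  have hg : ∀ t, 0 ≤ t → PySem.List.pyGetD (PySem.List.pySetD ans i 'X') t 'O'
      = if t = i then 'X' else PySem.List.pyGetD ans t 'O' := fun t ht => g_set ans i t 'X' hi0 hil ht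
  cases h : scanPrev ans j with
  | none =>
    rw [if_neg (by simp)]
    refine scanPrev_eq_none _ j (fun t ht1 ht2 => ?_)
    rw [hg t ht1]
    split_ifs with he
    · rfl
    · exact scanPrev_none ans j h t ht1 ht2
  | some r =>
    obtain ⟨h1, h2, h3, h4⟩ := scanPrev_some ans j r h
    by_cases hri : r = i
    · subst hri
      rw [if_pos rfl]
      cases h2' : scanPrev ans (r - 1) with
      | some r2 =>
        obtain ⟨g1, g2, g3, g4⟩ := scanPrev_some ans (r - 1) r2 h2'
        refine scanPrev_eq_some _ j r2 g1 (by omega) ?_ (fun t ht1 ht2 => ?_)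
        · rw [hg r2 g1, if_neg (by omega)]; exact g3
        · rw [hg t (by omega)]
          split_ifs with he
          · rfl
          · rcases lt_or_gt_of_ne he with hlt | hgt
            · exact g4 t ht1 (by omega)
            · exact h4 t hgt ht2
      | none =>
        refine scanPrev_eq_none _ j (fun t ht1 ht2 => ?_)
        rw [hg t ht1]
        split_ifs with he
        · rfl
        · rcases lt_or_gt_of_ne he with hlt | hgt
          · exact scanPrev_none ans (r - 1) h2' t ht1 (by omega)
          · exact h4 t hgt ht2
    · rw [if_neg (by simp [hri])]
      refine scanPrev_eq_some _ j r h1 h2 ?_ (fun t ht1 ht2 => ?_)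
      · rw [hg r h1, if_neg hri]; exact h3
      · rw [hg t (by omega)]
        split_ifs with he
        · rfl
        · exact h4 t ht1 ht2

-- effect of restoring cell x (currently dead) on the scans
lemma scanNext_revive (ans : List Char) (n x j : Int) (hx0 : 0 ≤ x) (hxl : x < (ans.length : Int))
    (hdead : PySem.List.pyGetD ans x 'O' = 'X') (hj : 0 ≤ j) :
    scanNext (PySem.List.pySetD ans x 'O') n j =
      if j ≤ x ∧ x < n ∧ (∀ t, j ≤ t → t < x → PySem.List.pyGetD ans t 'O' = 'X') then some x
      else scanNext ans n j := by
  have hg : ∀ t, 0 ≤ t → PySem.List.pyGetD (PySem.List.pySetD ans x 'O') t 'O'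
      = if t = x then 'O' else PySem.List.pyGetD ans t 'O' := fun t ht => g_set ans x t 'O' hx0 hxl ht
  split_ifs with hc
  · obtain ⟨c1, c2, c3⟩ := hc
    refine scanNext_eq_some _ n j x c1 c2 ?_ (fun t ht1 ht2 => ?_)
    · rw [hg x hx0, if_pos rfl]; decide
    · rw [hg t (by omega), if_neg (by omega)]; exact c3 t ht1 ht2
  · cases h : scanNext ans n j with
    | none =>
      have hnx : ¬ (j ≤ x ∧ x < n) := by
        intro ⟨a1, a2⟩
        exact hc ⟨a1, a2, fun t ht1 ht2 => scanNext_none ans n j h t ht1 (by omega)⟩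
      refine scanNext_eq_none _ n j (fun t ht1 ht2 => ?_)
      rw [hg t (by omega), if_neg (by intro he; subst he; omega)]
      exact scanNext_none ans n j h t ht1 ht2
    | some r =>
      obtain ⟨h1, h2, h3, h4⟩ := scanNext_some ans n j r h
      have hrx : r ≠ x := fun he => h3 (he ▸ hdead)
      have hxout : ¬ (j ≤ x ∧ x < r) := by
        intro ⟨a1, a2⟩
        exact hc ⟨a1, by omega, fun t ht1 ht2 => h4 t ht1 (by omega)⟩
      refine scanNext_eq_some _ n j r h1 h2 ?_ (fun t ht1 ht2 => ?_)
      · rw [hg r (by omega), if_neg hrx]; exact h3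
      · rw [hg t (by omega), if_neg (by intro he; subst he; omega)]
        exact h4 t ht1 ht2

lemma scanPrev_revive (ans : List Char) (x j : Int) (hx0 : 0 ≤ x) (hxl : x < (ans.length : Int))
    (hdead : PySem.List.pyGetD ans x 'O' = 'X') :
    scanPrev (PySem.List.pySetD ans x 'O') j =
      if x ≤ j ∧ (∀ t, x < t → t ≤ j → PySem.List.pyGetD ans t 'O' = 'X') then some x
      else scanPrev ans j := by
  have hg : ∀ t, 0 ≤ t → PySem.List.pyGetD (PySem.List.pySetD ans x 'O') t 'O'
      = if t = x then 'O' else PySem.List.pyGetD ans t 'O' := fun t ht => g_set ans x t 'O' hx0 hxl ht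
  split_ifs with hc
  · obtain ⟨c1, c2⟩ := hc
    refine scanPrev_eq_some _ j x hx0 c1 ?_ (fun t ht1 ht2 => ?_)
    · rw [hg x hx0, if_pos rfl]; decide
    · rw [hg t (by omega), if_neg (by omega)]; exact c2 t ht1 ht2
  · cases h : scanPrev ans j with
    | none =>
      refine scanPrev_eq_none _ j (fun t ht1 ht2 => ?_)
      rw [hg t ht1, if_neg ?_]
      · exact scanPrev_none ans j h t ht1 ht2
      · intro he; subst he
        exact hc ⟨ht2, fun t' ht1' ht2' => scanPrev_none ans j h t' (by omega) ht2'⟩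
    | some r =>
      obtain ⟨h1, h2, h3, h4⟩ := scanPrev_some ans j r h
      have hrx : r ≠ x := fun he => h3 (he ▸ hdead)
      have hxout : ¬ (r < x ∧ x ≤ j) := by
        intro ⟨a1, a2⟩
        exact hc ⟨a2, fun t ht1 ht2 => h4 t (by omega) ht2⟩
      refine scanPrev_eq_some _ j r h1 h2 ?_ (fun t ht1 ht2 => ?_)
      · rw [hg r h1, if_neg hrx]; exact h3
      · rw [hg t (by omega), if_neg (by intro he; subst he; omega)]
        exact h4 t ht1 ht2

lemma g_replicate (m : Nat) (i : Int) (h : 0 ≤ i) :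
    PySem.List.pyGetD (List.replicate m 'O') i 'O' = 'O' := by
  rw [PySem.List.pyGetD_of_nonneg _ _ h, List.getD_eq_getElem?_getD, List.getElem?_replicate]
  split <;> rfl

-- the undo stack read bottom-up: each frame's neighbours are the true alive neighbours of its row
-- in the table state right after that row was deleted (restores are LIFO, so popping the top frame
-- meets exactly the state its neighbours were recorded in)
def StackOK (n : Int) : List Char → List (Option Int × Int × Option Int) → Prop
  | _, [] => True
  | ans, (p, x, nx) :: rest =>
    0 ≤ x ∧ x < n ∧ PySem.List.pyGetD ans x 'O' = 'X' ∧ ¬(p = none ∧ nx = none) ∧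
    p = scanPrev (PySem.List.pySetD ans x 'O') (x - 1) ∧
    nx = scanNext (PySem.List.pySetD ans x 'O') n (x + 1) ∧
    StackOK n (PySem.List.pySetD ans x 'O') rest

-- the coupling invariant between A's linked-list state, B's scan state and the Pre_ simulator state
structure InvPV (n : Int) (a : StA) (b : StB) (del : List Int) (now : Option Int) : Prop where
  hn2 : 2 ≤ n
  hlen : (a.ans.length : Int) = n
  hba : b.ans = a.ans
  hbn : b.now = a.now
  hsn : now = a.now
  hbd : b.del = a.rmd.map (fun e => e.2.1)
  hsd : del = b.del
  htbl : ∀ i, 0 ≤ i → i < n → PySem.List.pyGetD a.ans i 'O' = 'O' →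
    a.tbl i = (scanPrev a.ans (i - 1), scanNext a.ans n (i + 1))
  hstk : StackOK n a.ans a.rmd.reverse
  hfrm : ∀ e ∈ a.rmd, a.tbl e.2.1 = (e.1, e.2.2)
  hnow : ∀ i, a.now = some i → 0 ≤ i → i < n → PySem.List.pyGetD a.ans i 'O' = 'O'
  hdel : ∀ i, 0 ≤ i → i < n → (i ∈ del ↔ PySem.List.pyGetD a.ans i 'O' = 'X')
  hOX : ∀ i, 0 ≤ i → i < n → PySem.List.pyGetD a.ans i 'O' = 'O' ∨ PySem.List.pyGetD a.ans i 'O' = 'X'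
  hnd : del.Nodup
  hdb : ∀ x ∈ del, 0 ≤ x ∧ x < n

-- one validated move step at a time: the three loop bodies stay in lock-step
lemma moveLoop_eq (n : Int) (fA fB fS : Int → Option Int) (ok : Int → Prop)
    (hf : ∀ i, 0 ≤ i → i < n → ok i →
      fA i = fB i ∧ fS i = fB i ∧ ∀ r, fB i = some r → 0 ≤ r → r < n → ok r) :
    ∀ (m : Nat) (now now' : Option Int), (∀ i, now = some i → 0 ≤ i → i < n → ok i) →
      simMove fS n m (some now) = some now' →
      moveLoop fA m now = now' ∧ moveLoop fB m now = now' ∧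
        (∀ i, now' = some i → 0 ≤ i → i < n → ok i) := by
  intro m
  induction m with
  | zero => intro now now' hok h; cases h; exact ⟨rfl, rfl, hok⟩
  | succ m ih =>
    intro now now' hok h
    match hn : now with
    | none => simp only [simMove] at h; cases h
    | some i =>
      rw [simMove] at h
      by_cases hb : 0 ≤ i ∧ i < n
      · rw [if_pos hb] at h
        have hoki := hok i rfl hb.1 hb.2
        obtain ⟨e1, e2, e3⟩ := hf i hb.1 hb.2 hoki
        rw [e2] at h
        have hok' : ∀ r, fB i = some r → 0 ≤ r → r < n → ok r := e3
        obtain ⟨r1, r2, r3⟩ := ih (fB i) now' hok' h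
        exact ⟨by rw [moveLoop]; rw [e1]; exact r1, by rw [moveLoop]; exact r2, r3⟩
      · rw [if_neg hb] at h; cases h

lemma simFold_none (n : Int) (cmd : List String) : cmd.foldl (simStep n) none = none := by
  induction cmd with
  | nil => rfl
  | cons T rest ih => simp only [List.foldl_cons, simStep]; exact ih

lemma step_inv_C (n : Int) (a : StA) (b : StB) (del : List Int) (now : Option Int)
    (s' : List Int × Option Int) (I : InvPV n a b del now)
    (hsim : simStep n (some (del, now)) "C" = some s') :
    InvPV n (stepA n a "C") (stepB n b "C") s'.1 s'.2 := by
  cases hnowA : a.now with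
  | none => rw [I.hsn, hnowA] at hsim; simp only [simStep, reduceIte] at hsim; cases hsim
  | some i =>
    rw [I.hsn, hnowA] at hsim; simp only [simStep, reduceIte] at hsim
    by_cases hcond : 0 ≤ i ∧ i < n ∧ i ∉ del
    case neg => rw [if_neg hcond] at hsim; cases hsim
    obtain ⟨hi0, hin, hidel⟩ := hcond
    rw [if_pos ⟨hi0, hin, hidel⟩] at hsim
    have hcorrN : simNext del n (i + 1) = scanNext a.ans n (i + 1) :=
      simNext_eq_scanNext del a.ans n (i + 1) (fun t ht1 ht2 => I.hdel t (by omega) ht2)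
    have hcorrP : simPrev del (i - 1) = scanPrev a.ans (i - 1) :=
      simPrev_eq_scanPrev del a.ans (i - 1) (fun t ht1 ht2 => I.hdel t ht1 (by omega))
    rw [hcorrN, hcorrP] at hsim
    have haliveI : PySem.List.pyGetD a.ans i 'O' = 'O' := by
      rcases I.hOX i hi0 hin with h | h
      · exact h
      · exact absurd ((I.hdel i hi0 hin).mpr h) hidel
    have htblI : a.tbl i = (scanPrev a.ans (i - 1), scanNext a.ans n (i + 1)) :=
      I.htbl i hi0 hin haliveI
    have hil : i < (a.ans.length : Int) := by rw [I.hlen]; exact hin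
    have hgset : ∀ t, 0 ≤ t → PySem.List.pyGetD (PySem.List.pySetD a.ans i 'X') t 'O'
        = if t = i then 'X' else PySem.List.pyGetD a.ans t 'O' :=
      fun t ht => g_set a.ans i t 'X' hi0 hil ht
    have hNX' : scanNext (PySem.List.pySetD a.ans i 'X') n (i + 1) = scanNext a.ans n (i + 1) := by
      rw [scanNext_kill a.ans n i (i + 1) hi0 hil (by omega), if_neg ?_]
      intro he
      have := (scanNext_some a.ans n (i + 1) i he).1
      omega
    have hP' : scanPrev (PySem.List.pySetD a.ans i 'X') (i - 1) = scanPrev a.ans (i - 1) := by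
      rw [scanPrev_kill a.ans i (i - 1) hi0 hil, if_neg ?_]
      intro he
      have := (scanPrev_some a.ans (i - 1) i he).2.1
      omega
    have hrev : PySem.List.pySetD (PySem.List.pySetD a.ans i 'X') i 'O' = a.ans :=
      kill_revive a.ans i hi0 haliveI
    have hlen2 : (((PySem.List.pySetD a.ans i 'X').length : Nat) : Int) = n := by
      rw [PySem.List.length_pySetD]; exact I.hlen
    have hXi : PySem.List.pyGetD (PySem.List.pySetD a.ans i 'X') i 'O' = 'X' := by
      rw [hgset i hi0, if_pos rfl]
    have hdeleq : del = a.rmd.map (fun e => e.2.1) := by rw [I.hsd, I.hbd]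
    have hdead_del : ∀ x ∈ del, PySem.List.pyGetD a.ans x 'O' = 'X' :=
      fun x hx => (I.hdel x (I.hdb x hx).1 (I.hdb x hx).2).mp hx
    have hdel2 : ∀ t, 0 ≤ t → t < n →
        (t ∈ del ++ [i] ↔ PySem.List.pyGetD (PySem.List.pySetD a.ans i 'X') t 'O' = 'X') := by
      intro t h1 h2
      rw [hgset t h1, List.mem_append, List.mem_singleton]
      by_cases hti : t = i
      · subst hti; simp
      · rw [if_neg hti]; simp [hti, I.hdel t h1 h2]
    have hOX2 : ∀ t, 0 ≤ t → t < n →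
        PySem.List.pyGetD (PySem.List.pySetD a.ans i 'X') t 'O' = 'O' ∨
        PySem.List.pyGetD (PySem.List.pySetD a.ans i 'X') t 'O' = 'X' := by
      intro t h1 h2
      rw [hgset t h1]
      by_cases hti : t = i
      · rw [if_pos hti]; exact Or.inr rfl
      · rw [if_neg hti]; exact I.hOX t h1 h2
    have hnd2 : (del ++ [i]).Nodup := by
      rw [List.nodup_append]
      exact ⟨I.hnd, List.nodup_singleton i, by intro a ha c hc he; rw [List.mem_singleton] at hc; subst hc; subst he; exact hidel ha⟩
    have hdb2 : ∀ x ∈ del ++ [i], 0 ≤ x ∧ x < n := by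
      intro x hx
      rcases List.mem_append.mp hx with hx | hx
      · exact I.hdb x hx
      · rw [List.mem_singleton] at hx; subst hx; exact ⟨hi0, hin⟩
    have hbd2 : b.del ++ [i] = (a.rmd ++ [(scanPrev a.ans (i - 1), i, scanNext a.ans n (i + 1))]).map (fun e => e.2.1) := by
      rw [I.hbd, List.map_append]; rfl
    have hstk2 : StackOK n (PySem.List.pySetD a.ans i 'X')
        ((scanPrev a.ans (i - 1), i, scanNext a.ans n (i + 1)) :: a.rmd.reverse) := by
      refine ⟨hi0, hin, hXi, ?_, by rw [hrev], by rw [hrev], by rw [hrev]; exact I.hstk⟩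
      intro ⟨hp, hn⟩
      rw [hp, hn] at hsim; cases hsim
    have hrmdrev : (a.rmd ++ [(scanPrev a.ans (i - 1), i, scanNext a.ans n (i + 1))]).reverse
        = (scanPrev a.ans (i - 1), i, scanNext a.ans n (i + 1)) :: a.rmd.reverse := by
      simp
    simp only [stepA, stepB, hnowA, I.hbn, I.hba, htblI, if_true, hNX', hP']
    cases hNXc : scanNext a.ans n (i + 1) with
    | some x2 =>
      rw [hNXc] at hsim
      obtain ⟨hx1, hx2, hx3, hx4⟩ := scanNext_some a.ans n (i + 1) x2 hNXc
      have hx3O : PySem.List.pyGetD a.ans x2 'O' = 'O' := by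
        rcases I.hOX x2 (by omega) hx2 with h | h
        · exact h
        · exact absurd h hx3
      have claimP : ∀ r, 0 ≤ r → r < n → PySem.List.pyGetD a.ans r 'O' = 'O' →
          (scanPrev a.ans (r - 1) = some i ↔ r = x2) := by
        intro r h1 h2 h3
        constructor
        · intro he
          obtain ⟨e1, e2, e3, e4⟩ := scanPrev_some a.ans (r - 1) i he
          by_cases hrx : r = x2
          · exact hrx
          · exfalso
            have hri : i < r := by omega
            by_cases hlt : r < x2
            · have := hx4 r (by omega) hlt
              rw [h3] at this; exact absurd this (by decide)
            · have := e4 x2 (by omega) (by omega)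
              rw [hx3O] at this; exact absurd this (by decide)
        · intro he; rw [he]
          exact scanPrev_eq_some a.ans (x2 - 1) i (by omega) (by omega)
            (by rw [haliveI]; decide) (fun t ht1 ht2 => hx4 t (by omega) (by omega))
      cases hPc : scanPrev a.ans (i - 1) with
      | some p1 =>
        rw [hPc] at hsim
        cases hsim
        rw [hNXc, hPc] at htblI hbd2 hrmdrev hstk2
        dsimp only
        obtain ⟨hp1, hp2, hp3, hp4⟩ := scanPrev_some a.ans (i - 1) p1 hPc
        have hp3O : PySem.List.pyGetD a.ans p1 'O' = 'O' := by
          rcases I.hOX p1 hp1 (by omega) with h | h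
          · exact h
          · exact absurd h hp3
        have hp1x2 : p1 ≠ x2 := by omega
        have claimN : ∀ r, 0 ≤ r → r < n → PySem.List.pyGetD a.ans r 'O' = 'O' →
            (scanNext a.ans n (r + 1) = some i ↔ r = p1) := by
          intro r h1 h2 h3
          constructor
          · intro he
            obtain ⟨e1, e2, e3, e4⟩ := scanNext_some a.ans n (r + 1) i he
            by_cases hrp : r = p1
            · exact hrp
            · exfalso
              have hri : r < i := by omega
              by_cases hgt : p1 < r
              · have := hp4 r hgt (by omega)
                rw [h3] at this; exact absurd this (by decide)
              · have := e4 p1 (by omega) (by omega)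
                rw [hp3O] at this; exact absurd this (by decide)
          · intro he; rw [he]
            exact scanNext_eq_some a.ans n (p1 + 1) i (by omega) hin
              (by rw [haliveI]; decide) (fun t ht1 ht2 => hp4 t (by omega) (by omega))
        refine ⟨I.hn2, hlen2, rfl, rfl, rfl, by dsimp only; exact hbd2, by dsimp only; rw [I.hsd], ?_, by dsimp only; rw [hrmdrev]; exact hstk2, ?_, ?_, hdel2, hOX2, hnd2, hdb2⟩
        · -- htbl
          intro r h1 h2 h3
          dsimp only at h3 ⊢
          have hri : r ≠ i := by
            intro he; rw [he, hXi] at h3; exact absurd h3 (by decide)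
          have haliver : PySem.List.pyGetD a.ans r 'O' = 'O' := by
            rw [hgset r h1, if_neg hri] at h3; exact h3
          have hSN := scanNext_kill a.ans n i (r + 1) hi0 hil (by omega)
          have hSP := scanPrev_kill a.ans i (r - 1) hi0 hil
          have htblr := I.htbl r h1 h2 haliver
          by_cases hrp : r = p1
          · subst hrp
            rw [Function.update_of_ne hp1x2, Function.update_self]
            rw [hSN, if_pos ((claimN r h1 h2 haliver).mpr rfl), hNXc]
            rw [hSP, if_neg (fun hc => hp1x2 ((claimP r h1 h2 haliver).mp hc))]
            rw [htblr]
          · by_cases hrx : r = x2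
            · subst hrx
              rw [Function.update_self, Function.update_of_ne hp1x2.symm]
              rw [hSN, if_neg (fun hc => hrp ((claimN r h1 h2 haliver).mp hc))]
              rw [hSP, if_pos ((claimP r h1 h2 haliver).mpr rfl), hPc]
              rw [htblr]
            · rw [Function.update_of_ne (fun h => hrx h), Function.update_of_ne (fun h => hrp h)]
              rw [hSN, if_neg (fun hc => hrp ((claimN r h1 h2 haliver).mp hc))]
              rw [hSP, if_neg (fun hc => hrx ((claimP r h1 h2 haliver).mp hc))]
              rw [htblr]
        · -- hfrm
          intro e he
          dsimp only at he ⊢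
          rcases List.mem_append.mp he with he | he
          · have hmid : e.2.1 ∈ del := by rw [hdeleq]; exact List.mem_map_of_mem he
            have hdead := hdead_del e.2.1 hmid
            have hne1 : e.2.1 ≠ p1 := fun h => by rw [h, hp3O] at hdead; exact absurd hdead (by decide)
            have hne2 : e.2.1 ≠ x2 := fun h => by rw [h, hx3O] at hdead; exact absurd hdead (by decide)
            rw [Function.update_of_ne hne2, Function.update_of_ne hne1]
            exact I.hfrm e he
          · rw [List.mem_singleton] at he; subst he
            have hne1 : i ≠ p1 := by omega
            have hne2 : i ≠ x2 := by omega
            rw [Function.update_of_ne hne2, Function.update_of_ne hne1]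
            exact htblI
        · -- hnow
          intro r hr h1 h2
          dsimp only at hr ⊢
          cases hr
          rw [hgset x2 (by omega), if_neg (by omega)]
          exact hx3O
      | none =>
        rw [hPc] at hsim
        cases hsim
        rw [hNXc, hPc] at htblI hbd2 hrmdrev hstk2
        dsimp only
        have hPnone := scanPrev_none a.ans (i - 1) hPc
        have claimN : ∀ r, 0 ≤ r → r < n → PySem.List.pyGetD a.ans r 'O' = 'O' →
            scanNext a.ans n (r + 1) ≠ some i := by
          intro r h1 h2 h3 he
          obtain ⟨e1, e2, e3, e4⟩ := scanNext_some a.ans n (r + 1) i he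
          have := hPnone r h1 (by omega)
          rw [h3] at this; exact absurd this (by decide)
        refine ⟨I.hn2, hlen2, rfl, rfl, rfl, by dsimp only; exact hbd2, by dsimp only; rw [I.hsd], ?_, by dsimp only; rw [hrmdrev]; exact hstk2, ?_, ?_, hdel2, hOX2, hnd2, hdb2⟩
        · -- htbl
          intro r h1 h2 h3
          dsimp only at h3 ⊢
          have hri : r ≠ i := by
            intro he; rw [he, hXi] at h3; exact absurd h3 (by decide)
          have haliver : PySem.List.pyGetD a.ans r 'O' = 'O' := by
            rw [hgset r h1, if_neg hri] at h3; exact h3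
          have hSN := scanNext_kill a.ans n i (r + 1) hi0 hil (by omega)
          have hSP := scanPrev_kill a.ans i (r - 1) hi0 hil
          have htblr := I.htbl r h1 h2 haliver
          by_cases hrx : r = x2
          · subst hrx
            rw [Function.update_self]
            rw [hSN, if_neg (claimN r h1 h2 haliver)]
            rw [hSP, if_pos ((claimP r h1 h2 haliver).mpr rfl), hPc]
            rw [htblr]
          · rw [Function.update_of_ne (fun h => hrx h)]
            rw [hSN, if_neg (claimN r h1 h2 haliver)]
            rw [hSP, if_neg (fun hc => hrx ((claimP r h1 h2 haliver).mp hc))]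
            rw [htblr]
        · -- hfrm
          intro e he
          dsimp only at he ⊢
          rcases List.mem_append.mp he with he | he
          · have hmid : e.2.1 ∈ del := by rw [hdeleq]; exact List.mem_map_of_mem he
            have hdead := hdead_del e.2.1 hmid
            have hne2 : e.2.1 ≠ x2 := fun h => by rw [h, hx3O] at hdead; exact absurd hdead (by decide)
            rw [Function.update_of_ne hne2]
            exact I.hfrm e he
          · rw [List.mem_singleton] at he; subst he
            rw [Function.update_of_ne (by omega : i ≠ x2)]
            exact htblI
        · -- hnow
          intro r hr h1 h2
          dsimp only at hr ⊢
          cases hr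
          rw [hgset x2 (by omega), if_neg (by omega)]
          exact hx3O
    | none =>
      rw [hNXc] at hsim
      have hNnone := scanNext_none a.ans n (i + 1) hNXc
      cases hPc : scanPrev a.ans (i - 1) with
      | none => rw [hPc] at hsim; cases hsim
      | some p1 =>
        rw [hPc] at hsim
        cases hsim
        rw [hNXc, hPc] at htblI hbd2 hrmdrev hstk2
        dsimp only
        obtain ⟨hp1, hp2, hp3, hp4⟩ := scanPrev_some a.ans (i - 1) p1 hPc
        have hp3O : PySem.List.pyGetD a.ans p1 'O' = 'O' := by
          rcases I.hOX p1 hp1 (by omega) with h | h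
          · exact h
          · exact absurd h hp3
        have claimN : ∀ r, 0 ≤ r → r < n → PySem.List.pyGetD a.ans r 'O' = 'O' →
            (scanNext a.ans n (r + 1) = some i ↔ r = p1) := by
          intro r h1 h2 h3
          constructor
          · intro he
            obtain ⟨e1, e2, e3, e4⟩ := scanNext_some a.ans n (r + 1) i he
            by_cases hrp : r = p1
            · exact hrp
            · exfalso
              have hri : r < i := by omega
              by_cases hgt : p1 < r
              · have := hp4 r hgt (by omega)
                rw [h3] at this; exact absurd this (by decide)
              · have := e4 p1 (by omega) (by omega)
                rw [hp3O] at this; exact absurd this (by decide)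
          · intro he; rw [he]
            exact scanNext_eq_some a.ans n (p1 + 1) i (by omega) hin
              (by rw [haliveI]; decide) (fun t ht1 ht2 => hp4 t (by omega) (by omega))
        have claimP : ∀ r, 0 ≤ r → r < n → PySem.List.pyGetD a.ans r 'O' = 'O' →
            scanPrev a.ans (r - 1) ≠ some i := by
          intro r h1 h2 h3 he
          obtain ⟨e1, e2, e3, e4⟩ := scanPrev_some a.ans (r - 1) i he
          have := hNnone r (by omega) h2
          rw [h3] at this; exact absurd this (by decide)
        refine ⟨I.hn2, hlen2, rfl, rfl, rfl, by dsimp only; exact hbd2, by dsimp only; rw [I.hsd], ?_, by dsimp only; rw [hrmdrev]; exact hstk2, ?_, ?_, hdel2, hOX2, hnd2, hdb2⟩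
        · -- htbl
          intro r h1 h2 h3
          dsimp only at h3 ⊢
          have hri : r ≠ i := by
            intro he; rw [he, hXi] at h3; exact absurd h3 (by decide)
          have haliver : PySem.List.pyGetD a.ans r 'O' = 'O' := by
            rw [hgset r h1, if_neg hri] at h3; exact h3
          have hSN := scanNext_kill a.ans n i (r + 1) hi0 hil (by omega)
          have hSP := scanPrev_kill a.ans i (r - 1) hi0 hil
          have htblr := I.htbl r h1 h2 haliver
          by_cases hrp : r = p1
          · subst hrp
            rw [Function.update_self]
            rw [hSN, if_pos ((claimN r h1 h2 haliver).mpr rfl), hNXc]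
            rw [hSP, if_neg (claimP r h1 h2 haliver)]
            rw [htblr]
          · rw [Function.update_of_ne (fun h => hrp h)]
            rw [hSN, if_neg (fun hc => hrp ((claimN r h1 h2 haliver).mp hc))]
            rw [hSP, if_neg (claimP r h1 h2 haliver)]
            rw [htblr]
        · -- hfrm
          intro e he
          dsimp only at he ⊢
          rcases List.mem_append.mp he with he | he
          · have hmid : e.2.1 ∈ del := by rw [hdeleq]; exact List.mem_map_of_mem he
            have hdead := hdead_del e.2.1 hmid
            have hne1 : e.2.1 ≠ p1 := fun h => by rw [h, hp3O] at hdead; exact absurd hdead (by decide)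
            rw [Function.update_of_ne hne1]
            exact I.hfrm e he
          · rw [List.mem_singleton] at he; subst he
            rw [Function.update_of_ne (by omega : i ≠ p1)]
            exact htblI
        · -- hnow
          intro r hr h1 h2
          dsimp only at hr ⊢
          cases hr
          rw [hgset p1 (by omega), if_neg (by omega)]
          exact hp3O

lemma step_inv_Z (n : Int) (a : StA) (b : StB) (del : List Int) (now : Option Int)
    (s' : List Int × Option Int) (I : InvPV n a b del now)
    (hsim : simStep n (some (del, now)) "Z" = some s') :
    InvPV n (stepA n a "Z") (stepB n b "Z") s'.1 s'.2 := by
  rw [I.hsn] at hsim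
  simp only [simStep, reduceIte] at hsim
  by_cases hdel0 : del = []
  · rw [if_pos hdel0] at hsim; cases hsim
  rw [if_neg hdel0] at hsim
  cases hsim
  rcases List.eq_nil_or_concat a.rmd with hnil | ⟨ys, e, hys⟩
  · rw [I.hsd, I.hbd, hnil] at hdel0; exact absurd rfl hdel0
  obtain ⟨p, x, nx⟩ := e
  rw [List.concat_eq_append] at hys
  have hglA : a.rmd.getLast? = some (p, x, nx) := by rw [hys]; exact List.getLast?_concat
  have hdelconcat : del = ys.map (fun e => e.2.1) ++ [x] := by
    rw [I.hsd, I.hbd, hys, List.map_append]; rfl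
  have hglB : b.del.getLast? = some x := by
    rw [← I.hsd, hdelconcat]; exact List.getLast?_concat
  have hstk := I.hstk
  rw [hys] at hstk
  rw [List.reverse_append, List.reverse_singleton, List.singleton_append] at hstk
  obtain ⟨hx0, hxn, hxdead, hnotboth, hpEq, hnxEq, hrest⟩ := hstk
  have hxl : x < (a.ans.length : Int) := by rw [I.hlen]; exact hxn
  have hgset : ∀ t, 0 ≤ t → PySem.List.pyGetD (PySem.List.pySetD a.ans x 'O') t 'O'
      = if t = x then 'O' else PySem.List.pyGetD a.ans t 'O' :=
    fun t ht => g_set a.ans x t 'O' hx0 hxl ht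
  have hxO : PySem.List.pyGetD (PySem.List.pySetD a.ans x 'O') x 'O' = 'O' := by
    rw [hgset x hx0, if_pos rfl]
  have hxnotrest : x ∉ ys.map (fun e => e.2.1) := by
    have := I.hnd
    rw [hdelconcat, List.nodup_append] at this
    intro hmem
    exact this.2.2 x hmem x (List.mem_singleton.mpr rfl) rfl
  have hxdel : x ∈ del := by rw [hdelconcat]; exact List.mem_append_right _ (List.mem_singleton.mpr rfl)
  have hdrop : del.dropLast = ys.map (fun e => e.2.1) := by rw [hdelconcat]; exact List.dropLast_concat
  have hlen2 : (((PySem.List.pySetD a.ans x 'O').length : Nat) : Int) = n := by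
    rw [PySem.List.length_pySetD]; exact I.hlen
  have hdel2 : ∀ t, 0 ≤ t → t < n →
      (t ∈ del.dropLast ↔ PySem.List.pyGetD (PySem.List.pySetD a.ans x 'O') t 'O' = 'X') := by
    intro t h1 h2
    rw [hdrop, hgset t h1]
    by_cases htx : t = x
    · subst htx
      rw [if_pos rfl]
      simp [hxnotrest]
    · rw [if_neg htx]
      rw [← I.hdel t h1 h2, hdelconcat]
      simp [htx]
  have hOX2 : ∀ t, 0 ≤ t → t < n →
      PySem.List.pyGetD (PySem.List.pySetD a.ans x 'O') t 'O' = 'O' ∨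
      PySem.List.pyGetD (PySem.List.pySetD a.ans x 'O') t 'O' = 'X' := by
    intro t h1 h2
    rw [hgset t h1]
    by_cases htx : t = x
    · rw [if_pos htx]; exact Or.inl rfl
    · rw [if_neg htx]; exact I.hOX t h1 h2
  have hnd2 : del.dropLast.Nodup := by
    rw [hdrop]
    have := I.hnd
    rw [hdelconcat, List.nodup_append] at this
    exact this.1
  have hdb2 : ∀ t ∈ del.dropLast, 0 ≤ t ∧ t < n :=
    fun t ht => I.hdb t (by rw [hdrop] at ht; rw [hdelconcat]; exact List.mem_append_left _ ht)
  have hnow2 : ∀ r, a.now = some r → 0 ≤ r → r < n →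
      PySem.List.pyGetD (PySem.List.pySetD a.ans x 'O') r 'O' = 'O' := by
    intro r hr h1 h2
    rw [hgset r h1]
    by_cases hrx : r = x
    · rw [if_pos hrx]
    · rw [if_neg hrx]; exact I.hnow r hr h1 h2
  have hstk2 : StackOK n (PySem.List.pySetD a.ans x 'O') a.rmd.dropLast.reverse := by
    rw [hys, List.dropLast_concat]
    exact hrest
  have hbd2 : b.del.dropLast = a.rmd.dropLast.map (fun e => e.2.1) := by
    rw [← I.hsd, hdrop, hys, List.dropLast_concat]
  have hfrmmem : ∀ e ∈ ys, e.2.1 ∈ del ∧ e.2.1 ≠ x := by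
    intro e he
    have hmem : e.2.1 ∈ ys.map (fun e => e.2.1) := List.mem_map_of_mem he
    refine ⟨by rw [hdelconcat]; exact List.mem_append_left _ hmem, ?_⟩
    intro hex; rw [hex] at hmem; exact hxnotrest hmem
  have hdeadfrm : ∀ e ∈ ys, PySem.List.pyGetD a.ans e.2.1 'O' = 'X' := by
    intro e he
    obtain ⟨hmem, _⟩ := hfrmmem e he
    exact (I.hdel e.2.1 (I.hdb _ hmem).1 (I.hdb _ hmem).2).mp hmem
  have hSN := fun (j : Int) (hj : 0 ≤ j) => scanNext_revive a.ans n x j hx0 hxl hxdead hj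
  have hSP := fun (j : Int) => scanPrev_revive a.ans x j hx0 hxl hxdead
  have hgtrans : ∀ t, 0 ≤ t → t ≠ x →
      PySem.List.pyGetD (PySem.List.pySetD a.ans x 'O') t 'O' = PySem.List.pyGetD a.ans t 'O' := by
    intro t h1 h2; rw [hgset t h1, if_neg h2]
  have hframe : a.tbl x = (p, nx) := by
    refine I.hfrm (p, x, nx) ?_
    rw [hys]; exact List.mem_append_right _ (List.mem_singleton.mpr rfl)
  have halive_trans : ∀ r, 0 ≤ r → r ≠ x →
      PySem.List.pyGetD (PySem.List.pySetD a.ans x 'O') r 'O' = 'O' →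
      PySem.List.pyGetD a.ans r 'O' = 'O' := by
    intro r h1 h2 h3; rw [← hgtrans r h1 h2]; exact h3
  have hfrm2 : ∀ q, (∀ e ∈ ys, e.2.1 ≠ q) → (∀ e ∈ ys, Function.update a.tbl q ((Function.update a.tbl q ((a.tbl q).1, (a.tbl q).2)) e.2.1) e.2.1 = a.tbl e.2.1) := by
    intro q hq e he
    rw [Function.update_of_ne (hq e he)]
  simp only [stepA, stepB, reduceIte, hglA, hglB, I.hba, I.hbn,
    if_neg (show ¬ ("Z" : String) = "C" by decide)]
  rcases p with _ | p1 <;> rcases nx with _ | x2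
  · exact absurd ⟨rfl, rfl⟩ hnotboth
  · -- p = none, nx = some x2
    dsimp only
    obtain ⟨hx1, hx2n, hx3, hx4⟩ := scanNext_some _ n (x + 1) x2 hnxEq.symm
    have hx2x : x2 ≠ x := by omega
    have hx2O : PySem.List.pyGetD a.ans x2 'O' = 'O' := by
      rcases I.hOX x2 (by omega) hx2n with h | h
      · exact h
      · exfalso; rw [← hgtrans x2 (by omega) hx2x] at h; exact hx3 h
    have hrun : ∀ t, x < t → t < x2 → PySem.List.pyGetD a.ans t 'O' = 'X' := by
      intro t ht1 ht2
      rw [← hgtrans t (by omega) (by omega)]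
      exact hx4 t (by omega) ht2
    have hPnone' := scanPrev_none _ (x - 1) hpEq.symm
    have hnoleft : ∀ r, 0 ≤ r → r < x → PySem.List.pyGetD a.ans r 'O' ≠ 'O' := by
      intro r h1 h2 h3
      have := hPnone' r h1 (by omega)
      rw [hgtrans r h1 (by omega), h3] at this
      exact absurd this (by decide)
    refine ⟨I.hn2, hlen2, rfl, rfl, rfl, hbd2, by rw [I.hsd], ?_, hstk2, ?_, hnow2, hdel2, hOX2, hnd2, hdb2⟩
    · -- htbl
      intro r h1 h2 h3
      dsimp only at h3 ⊢
      by_cases hrx : r = x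
      · subst hrx
        rw [Function.update_of_ne (by omega : r ≠ x2), hframe, ← hpEq, ← hnxEq]
      · have haliver := halive_trans r h1 hrx h3
        have hrgt : x < r := by
          rcases lt_or_gt_of_ne hrx with h | h
          · exact absurd haliver (hnoleft r h1 h)
          · exact h
        by_cases hrx2 : r = x2
        · subst hrx2
          rw [Function.update_self]
          rw [show a.tbl r = (scanPrev a.ans (r - 1), scanNext a.ans n (r + 1)) from I.htbl r h1 h2 haliver]
          rw [hSP (r - 1), if_pos ⟨by omega, fun t ht1 ht2 => hrun t ht1 (by omega)⟩]
          rw [hSN (r + 1) (by omega), if_neg (fun hc => by omega)]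
        · have hrgt2 : x2 < r := by
            rcases lt_or_gt_of_ne hrx2 with h | h
            · exact absurd (hrun r hrgt h) (by rw [haliver]; decide)
            · exact h
          rw [Function.update_of_ne hrx2]
          rw [I.htbl r h1 h2 haliver]
          rw [hSP (r - 1), if_neg (fun hc => absurd (hc.2 x2 (by omega) (by omega)) (by rw [hx2O]; decide))]
          rw [hSN (r + 1) (by omega), if_neg (fun hc => by omega)]
    · -- hfrm
      intro e he
      dsimp only at he ⊢
      rw [hys, List.dropLast_concat] at he
      have hne : e.2.1 ≠ x2 := by
        intro hex
        have := hdeadfrm e he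
        rw [hex, hx2O] at this; exact absurd this (by decide)
      rw [Function.update_of_ne hne]
      exact I.hfrm e (by rw [hys]; exact List.mem_append_left _ he)
  · -- p = some p1, nx = none
    dsimp only
    obtain ⟨hp1, hp2, hp3, hp4⟩ := scanPrev_some _ (x - 1) p1 hpEq.symm
    have hp1x : p1 ≠ x := by omega
    have hp1O : PySem.List.pyGetD a.ans p1 'O' = 'O' := by
      rcases I.hOX p1 hp1 (by omega) with h | h
      · exact h
      · exfalso; rw [← hgtrans p1 hp1 hp1x] at h; exact hp3 h
    have hrun : ∀ t, p1 < t → t < x → PySem.List.pyGetD a.ans t 'O' = 'X' := by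
      intro t ht1 ht2
      rw [← hgtrans t (by omega) (by omega)]
      exact hp4 t ht1 (by omega)
    have hNnone' := scanNext_none _ n (x + 1) hnxEq.symm
    have hnoright : ∀ r, x < r → r < n → PySem.List.pyGetD a.ans r 'O' ≠ 'O' := by
      intro r h1 h2 h3
      have := hNnone' r (by omega) h2
      rw [hgtrans r (by omega) (by omega), h3] at this
      exact absurd this (by decide)
    refine ⟨I.hn2, hlen2, rfl, rfl, rfl, hbd2, by rw [I.hsd], ?_, hstk2, ?_, hnow2, hdel2, hOX2, hnd2, hdb2⟩
    · -- htbl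
      intro r h1 h2 h3
      dsimp only at h3 ⊢
      by_cases hrx : r = x
      · subst hrx
        rw [Function.update_of_ne (by omega : r ≠ p1), hframe, ← hpEq, ← hnxEq]
      · have haliver := halive_trans r h1 hrx h3
        have hrlt : r < x := by
          rcases lt_or_gt_of_ne hrx with h | h
          · exact h
          · exact absurd haliver (hnoright r h h2)
        by_cases hrp1 : r = p1
        · subst hrp1
          rw [Function.update_self]
          rw [show a.tbl r = (scanPrev a.ans (r - 1), scanNext a.ans n (r + 1)) from I.htbl r h1 h2 haliver]
          rw [hSP (r - 1), if_neg (fun hc => by omega)]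
          rw [hSN (r + 1) (by omega), if_pos ⟨by omega, hxn, fun t ht1 ht2 => hrun t (by omega) ht2⟩]
        · have hrlt2 : r < p1 := by
            rcases lt_or_gt_of_ne hrp1 with h | h
            · exact h
            · exact absurd (hrun r h hrlt) (by rw [haliver]; decide)
          rw [Function.update_of_ne hrp1]
          rw [I.htbl r h1 h2 haliver]
          rw [hSP (r - 1), if_neg (fun hc => by omega)]
          rw [hSN (r + 1) (by omega), if_neg (fun hc => absurd (hc.2.2 p1 (by omega) (by omega)) (by rw [hp1O]; decide))]
    · -- hfrm
      intro e he
      dsimp only at he ⊢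
      rw [hys, List.dropLast_concat] at he
      have hne : e.2.1 ≠ p1 := by
        intro hex
        have := hdeadfrm e he
        rw [hex, hp1O] at this; exact absurd this (by decide)
      rw [Function.update_of_ne hne]
      exact I.hfrm e (by rw [hys]; exact List.mem_append_left _ he)
  · -- p = some p1, nx = some x2
    dsimp only
    obtain ⟨hx1, hx2n, hx3, hx4⟩ := scanNext_some _ n (x + 1) x2 hnxEq.symm
    obtain ⟨hp1, hp2, hp3, hp4⟩ := scanPrev_some _ (x - 1) p1 hpEq.symm
    have hx2x : x2 ≠ x := by omega
    have hp1x : p1 ≠ x := by omega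
    have hp1x2 : p1 ≠ x2 := by omega
    have hx2O : PySem.List.pyGetD a.ans x2 'O' = 'O' := by
      rcases I.hOX x2 (by omega) hx2n with h | h
      · exact h
      · exfalso; rw [← hgtrans x2 (by omega) hx2x] at h; exact hx3 h
    have hp1O : PySem.List.pyGetD a.ans p1 'O' = 'O' := by
      rcases I.hOX p1 hp1 (by omega) with h | h
      · exact h
      · exfalso; rw [← hgtrans p1 hp1 hp1x] at h; exact hp3 h
    have hrunN : ∀ t, x < t → t < x2 → PySem.List.pyGetD a.ans t 'O' = 'X' := by
      intro t ht1 ht2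
      rw [← hgtrans t (by omega) (by omega)]
      exact hx4 t (by omega) ht2
    have hrunP : ∀ t, p1 < t → t < x → PySem.List.pyGetD a.ans t 'O' = 'X' := by
      intro t ht1 ht2
      rw [← hgtrans t (by omega) (by omega)]
      exact hp4 t ht1 (by omega)
    refine ⟨I.hn2, hlen2, rfl, rfl, rfl, hbd2, by rw [I.hsd], ?_, hstk2, ?_, hnow2, hdel2, hOX2, hnd2, hdb2⟩
    · -- htbl
      intro r h1 h2 h3
      dsimp only at h3 ⊢
      by_cases hrx : r = x
      · subst hrx
        rw [Function.update_of_ne (by omega : r ≠ p1), Function.update_of_ne (by omega : r ≠ x2),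
          hframe, ← hpEq, ← hnxEq]
      · have haliver := halive_trans r h1 hrx h3
        by_cases hrp1 : r = p1
        · subst hrp1
          rw [Function.update_self, Function.update_of_ne hp1x2]
          rw [show a.tbl r = (scanPrev a.ans (r - 1), scanNext a.ans n (r + 1)) from I.htbl r h1 h2 haliver]
          rw [hSP (r - 1), if_neg (fun hc => by omega)]
          rw [hSN (r + 1) (by omega), if_pos ⟨by omega, hxn, fun t ht1 ht2 => hrunP t (by omega) ht2⟩]
        · by_cases hrx2 : r = x2
          · subst hrx2
            rw [Function.update_of_ne (Ne.symm hp1x2), Function.update_self]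
            rw [show a.tbl r = (scanPrev a.ans (r - 1), scanNext a.ans n (r + 1)) from I.htbl r h1 h2 haliver]
            rw [hSP (r - 1), if_pos ⟨by omega, fun t ht1 ht2 => hrunN t ht1 (by omega)⟩]
            rw [hSN (r + 1) (by omega), if_neg (fun hc => by omega)]
          · have hrout : r < p1 ∨ x2 < r := by
              rcases lt_or_gt_of_ne hrx with h | h
              · rcases lt_or_gt_of_ne hrp1 with h' | h'
                · exact Or.inl h'
                · exact absurd (hrunP r h' h) (by rw [haliver]; decide)
              · rcases lt_or_gt_of_ne hrx2 with h' | h'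
                · exact absurd (hrunN r h h') (by rw [haliver]; decide)
                · exact Or.inr h'
            rw [Function.update_of_ne hrp1, Function.update_of_ne hrx2]
            rw [I.htbl r h1 h2 haliver]
            rw [hSP (r - 1), if_neg (fun hc => hrout.elim (fun h => by omega)
              (fun h => absurd (hc.2 x2 (by omega) (by omega)) (by rw [hx2O]; decide)))]
            rw [hSN (r + 1) (by omega), if_neg (fun hc => hrout.elim
              (fun h => absurd (hc.2.2 p1 (by omega) (by omega)) (by rw [hp1O]; decide))
              (fun h => by omega))]
    · -- hfrm
      intro e he
      dsimp only at he ⊢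
      rw [hys, List.dropLast_concat] at he
      have hne1 : e.2.1 ≠ p1 := by
        intro hex
        have := hdeadfrm e he
        rw [hex, hp1O] at this; exact absurd this (by decide)
      have hne2 : e.2.1 ≠ x2 := by
        intro hex
        have := hdeadfrm e he
        rw [hex, hx2O] at this; exact absurd this (by decide)
      rw [Function.update_of_ne hne1, Function.update_of_ne hne2]
      exact I.hfrm e (by rw [hys]; exact List.mem_append_left _ he)

lemma step_inv_move (n : Int) (a : StA) (b : StB) (del : List Int) (now : Option Int)
    (T : String) (hC : T ≠ "C") (hZ : T ≠ "Z")
    (s' : List Int × Option Int) (I : InvPV n a b del now)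
    (hsim : simStep n (some (del, now)) T = some s') :
    InvPV n (stepA n a T) (stepB n b T) s'.1 s'.2 := by
  rw [I.hsn] at hsim
  simp only [simStep, if_neg hC, if_neg hZ] at hsim
  cases hs : PySem.Str.split₀ T with
  | nil => rw [hs] at hsim; dsimp only at hsim; cases hsim
  | cons d rest =>
    cases rest with
    | nil => rw [hs] at hsim; dsimp only at hsim; cases hsim
    | cons c rest2 =>
      cases rest2 with
      | cons u v => rw [hs] at hsim; dsimp only at hsim; cases hsim
      | nil =>
        rw [hs] at hsim
        dsimp only at hsim
        cases ho : PySem.Int.ofStr? c with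
        | none => rw [ho] at hsim; cases hsim
        | some cnt =>
          rw [ho] at hsim
          simp only [stepA, stepB, if_neg hC, if_neg hZ, hs, ho, I.hba, I.hbn]
          by_cases hd : d = "D"
          · subst hd
            simp only [reduceIte] at hsim ⊢
            cases hm : simMove (fun i => simNext del n (i + 1)) n cnt.toNat (some a.now) with
            | none => rw [hm] at hsim; cases hsim
            | some now' =>
              rw [hm] at hsim
              cases hsim
              have hf : ∀ i, 0 ≤ i → i < n → PySem.List.pyGetD a.ans i 'O' = 'O' →
                  (a.tbl i).2 = scanNext a.ans n (i + 1) ∧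
                  simNext del n (i + 1) = scanNext a.ans n (i + 1) ∧
                  ∀ r, scanNext a.ans n (i + 1) = some r → 0 ≤ r → r < n →
                    PySem.List.pyGetD a.ans r 'O' = 'O' := by
                intro i h1 h2 h3
                refine ⟨by rw [I.htbl i h1 h2 h3], ?_, ?_⟩
                · exact simNext_eq_scanNext del a.ans n (i + 1)
                    (fun t ht1 ht2 => I.hdel t (by omega) ht2)
                · intro r hr hr1 hr2
                  rcases I.hOX r hr1 hr2 with h | h
                  · exact h
                  · exact absurd h (scanNext_some a.ans n (i + 1) r hr).2.2.1
              obtain ⟨e1, e2, e3⟩ := moveLoop_eq n (fun i => (a.tbl i).2)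
                (fun i => scanNext a.ans n (i + 1)) (fun i => simNext del n (i + 1))
                (fun r => PySem.List.pyGetD a.ans r 'O' = 'O') hf cnt.toNat a.now now' I.hnow hm
              exact ⟨I.hn2, I.hlen, rfl, e2.trans e1.symm, e1.symm, I.hbd, I.hsd, I.htbl,
                I.hstk, I.hfrm, by intro i hi h1 h2; rw [show ({ ans := a.ans, tbl := a.tbl, now := moveLoop _ cnt.toNat a.now, rmd := a.rmd } : StA).now = moveLoop _ cnt.toNat a.now from rfl, e1] at hi; exact e3 i hi h1 h2, I.hdel, I.hOX, I.hnd, I.hdb⟩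
          · simp only [if_neg hd] at hsim ⊢
            cases hm : simMove (fun i => simPrev del (i - 1)) n cnt.toNat (some a.now) with
            | none => rw [hm] at hsim; cases hsim
            | some now' =>
              rw [hm] at hsim
              cases hsim
              have hf : ∀ i, 0 ≤ i → i < n → PySem.List.pyGetD a.ans i 'O' = 'O' →
                  (a.tbl i).1 = scanPrev a.ans (i - 1) ∧
                  simPrev del (i - 1) = scanPrev a.ans (i - 1) ∧
                  ∀ r, scanPrev a.ans (i - 1) = some r → 0 ≤ r → r < n →
                    PySem.List.pyGetD a.ans r 'O' = 'O' := by
                intro i h1 h2 h3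
                refine ⟨by rw [I.htbl i h1 h2 h3], ?_, ?_⟩
                · exact simPrev_eq_scanPrev del a.ans (i - 1)
                    (fun t ht1 ht2 => I.hdel t ht1 (by omega))
                · intro r hr hr1 hr2
                  rcases I.hOX r hr1 hr2 with h | h
                  · exact h
                  · exact absurd h (scanPrev_some a.ans (i - 1) r hr).2.2.1
              obtain ⟨e1, e2, e3⟩ := moveLoop_eq n (fun i => (a.tbl i).1)
                (fun i => scanPrev a.ans (i - 1)) (fun i => simPrev del (i - 1))
                (fun r => PySem.List.pyGetD a.ans r 'O' = 'O') hf cnt.toNat a.now now' I.hnow hm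
              exact ⟨I.hn2, I.hlen, rfl, e2.trans e1.symm, e1.symm, I.hbd, I.hsd, I.htbl,
                I.hstk, I.hfrm, by intro i hi h1 h2; rw [show ({ ans := a.ans, tbl := a.tbl, now := moveLoop _ cnt.toNat a.now, rmd := a.rmd } : StA).now = moveLoop _ cnt.toNat a.now from rfl, e1] at hi; exact e3 i hi h1 h2, I.hdel, I.hOX, I.hnd, I.hdb⟩

lemma step_inv (n : Int) (a : StA) (b : StB) (s : List Int × Option Int) (T : String)
    (s' : List Int × Option Int) (I : InvPV n a b s.1 s.2)
    (hsim : simStep n (some s) T = some s') :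
    InvPV n (stepA n a T) (stepB n b T) s'.1 s'.2 := by
  obtain ⟨del, now⟩ := s
  by_cases hC : T = "C"
  · subst hC; exact step_inv_C n a b del now s' I hsim
  by_cases hZ : T = "Z"
  · subst hZ; exact step_inv_Z n a b del now s' I hsim
  exact step_inv_move n a b del now T hC hZ s' I hsim

lemma fold_inv (n : Int) (cmd : List String) :
    ∀ (a : StA) (b : StB) (s : List Int × Option Int), InvPV n a b s.1 s.2 →
      (cmd.foldl (simStep n) (some s)).isSome = true →
      (cmd.foldl (stepA n) a).ans = (cmd.foldl (stepB n) b).ans := by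
  induction cmd with
  | nil => intro a b s I _; exact I.hba.symm
  | cons T rest ih =>
    intro a b s I h
    simp only [List.foldl_cons] at h ⊢
    cases hstep : simStep n (some s) T with
    | none => rw [hstep, simFold_none] at h; cases h
    | some s1 => rw [hstep] at h; exact ih _ _ _ (step_inv n a b s T s1 I hstep) h

lemma init_inv (n k : Int) (hn2 : 2 ≤ n) :
    InvPV n ⟨List.replicate n.toNat 'O',
      Function.update (Function.update (fun i => (some (i - 1), some (i + 1))) 0 (none, some 1))
        (n - 1) (some (n - 2), none), some k, []⟩
      ⟨List.replicate n.toNat 'O', [], some k⟩ [] (some k) := by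
  have hO : ∀ i : Int, 0 ≤ i → PySem.List.pyGetD (List.replicate n.toNat 'O') i 'O' = 'O' :=
    fun i h => g_replicate n.toNat i h
  have hsn : ∀ j : Int, 0 ≤ j → scanNext (List.replicate n.toNat 'O') n j
      = if j < n then some j else none := by
    intro j hj
    split_ifs with hlt
    · exact scanNext_eq_some _ n j j le_rfl hlt (by rw [hO j hj]; decide) (fun t h1 h2 => by omega)
    · exact scanNext_eq_none _ n j (fun t h1 h2 => by omega)
  have hsp : ∀ j : Int, scanPrev (List.replicate n.toNat 'O') j
      = if 0 ≤ j then some j else none := by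
    intro j
    split_ifs with hge
    · exact scanPrev_eq_some _ j j hge le_rfl (by rw [hO j hge]; decide) (fun t h1 h2 => by omega)
    · exact scanPrev_eq_none _ j (fun t h1 h2 => by omega)
  refine ⟨hn2, by simp; omega, rfl, rfl, rfl, rfl, rfl, ?_, trivial, by simp,
    fun i _ _ _ => hO i (by omega), fun i h1 h2 => by simp [hO i h1], fun i h1 h2 => Or.inl (hO i h1),
    List.nodup_nil, by simp⟩
  intro i h0 hn _
  simp only
  by_cases hi0 : i = 0
  · subst hi0
    rw [Function.update_of_ne (by omega), Function.update_self]
    rw [hsp, hsn (0 + 1) (by omega)]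
    rw [if_neg (by omega : ¬ (0:Int) ≤ 0 - 1), if_pos (by omega : (0:Int) + 1 < n)]
    norm_num
  · by_cases hin : i = n - 1
    · subst hin
      rw [Function.update_self]
      rw [hsp, hsn (n - 1 + 1) (by omega)]
      rw [if_pos (by omega : (0:Int) ≤ n - 1 - 1), if_neg (by omega : ¬ n - 1 + 1 < n)]
      have e : n - 1 - 1 = n - 2 := by omega
      rw [e]
    · rw [Function.update_of_ne (by omega), Function.update_of_ne (by omega)]
      rw [hsp, hsn (i + 1) (by omega), if_pos (by omega), if_pos (by omega)]

lemma smallMove_parts (T : String) (h : smallMoveB T = true) :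
    ∃ d c m, PySem.Str.split₀ T = [d, c] ∧ PySem.Int.ofStr? c = some m ∧ m.toNat = 0 ∧
      T ≠ "C" ∧ T ≠ "Z" := by
  unfold smallMoveB at h
  cases hs : PySem.Str.split₀ T with
  | nil => rw [hs] at h; simp at h
  | cons d rest =>
    cases rest with
    | nil => rw [hs] at h; simp at h
    | cons c rest2 =>
      cases rest2 with
      | nil =>
        rw [hs] at h
        cases ho : PySem.Int.ofStr? c with
        | none => simp only [ho] at h; simp at h
        | some m =>
          simp only [ho] at h
          refine ⟨d, c, m, rfl, ho, by simp at h; omega, ?_, ?_⟩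
          · intro he; subst he
            rw [show PySem.Str.split₀ "C" = ["C"] from by decide] at hs; cases hs
          · intro he; subst he
            rw [show PySem.Str.split₀ "Z" = ["Z"] from by decide] at hs; cases hs
      | cons _ _ => rw [hs] at h; simp at h

lemma stepA_small (n : Int) (st : StA) (T : String) (h : smallMoveB T = true) :
    stepA n st T = st := by
  obtain ⟨d, c, m, hs, ho, hm, hC, hZ⟩ := smallMove_parts T h
  simp only [stepA, if_neg hC, if_neg hZ, hs, ho, hm, moveLoop]
  split_ifs <;> rfl

lemma stepB_small (n : Int) (st : StB) (T : String) (h : smallMoveB T = true) :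
    stepB n st T = st := by
  obtain ⟨d, c, m, hs, ho, hm, hC, hZ⟩ := smallMove_parts T h
  simp only [stepB, if_neg hC, if_neg hZ, hs, ho, hm, moveLoop]
  split_ifs <;> rfl

lemma foldl_id {σ : Type} (step : σ → String → σ) (cmd : List String) (st : σ)
    (h : ∀ T ∈ cmd, ∀ s : σ, step s T = s) : cmd.foldl step st = st := by
  induction cmd generalizing st with
  | nil => rfl
  | cons T rest ih =>
    rw [List.foldl_cons, h T (by simp)]
    exact ih st (fun T' hT' s => h T' (by simp [hT']) s)

-- ===== VERDICT (by name: the statement is the Claim_ definition above) =====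
theorem solution_spec : Claim_equal_solution := by
  unfold Claim_equal_solution
  intro n k cmd _ hpre
  unfold Spec_solution solution solution_alt
  dsimp only
  rcases hpre with rfl | ⟨hn2, hsim⟩ | ⟨hn1, hsmall⟩
  · rfl
  · rw [fold_inv n cmd _ _ ([], some k) (init_inv n k hn2) hsim]
  · rw [foldl_id (stepA n) cmd _ (fun T hT s => stepA_small n s T (hsmall T hT)),
      foldl_id (stepB n) cmd _ (fun T hT s => stepB_small n s T (hsmall T hT))]
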